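-- pv_equiv track=rewrite | github.com/jameelmiah/render-api | main.py | pick_assets
-- ===== SOURCE A (Python) =====
-- def pick_assets(slides, media_paths):
--     # Very simple: least-used first, reuse allowed
--     use = {p: 0 for p in media_paths}
--     for s in slides:
--         if not media_paths:
--             s["asset"] = None
--             continue
--         pick = sorted(media_paths, key=lambda p: use[p])[0]
--         s["asset"] = pick
--         use[pick] += 1
--     return slides
-- ===== SOURCE B (Python) =====
-- def pick_assets(slides, media_paths):
--     # Round-robin over the distinct paths in first-occurrence order:
--     # least-used-first with stable ties IS a cyclic assignment. O(S+M).
--     # Mutates the slide dicts in place and returns slides, like the original.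
--     order = list(dict.fromkeys(media_paths))
--     n = len(order)
--     for i, s in enumerate(slides):
--         s["asset"] = order[i % n] if n else None
--     return slides
-- ===== Notes on version B (the rewrite author's own statement) =====
-- stated objective: faster
-- what changed: B replaces A's per-slide full re-sort of media_paths by a single ordered dedup plus a round-robin assignment (slide i gets distinct path i mod n), since stable least-used-first picking is exactly cyclic assignment over the distinct paths in first-occurrence order.
import Mathlib
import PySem

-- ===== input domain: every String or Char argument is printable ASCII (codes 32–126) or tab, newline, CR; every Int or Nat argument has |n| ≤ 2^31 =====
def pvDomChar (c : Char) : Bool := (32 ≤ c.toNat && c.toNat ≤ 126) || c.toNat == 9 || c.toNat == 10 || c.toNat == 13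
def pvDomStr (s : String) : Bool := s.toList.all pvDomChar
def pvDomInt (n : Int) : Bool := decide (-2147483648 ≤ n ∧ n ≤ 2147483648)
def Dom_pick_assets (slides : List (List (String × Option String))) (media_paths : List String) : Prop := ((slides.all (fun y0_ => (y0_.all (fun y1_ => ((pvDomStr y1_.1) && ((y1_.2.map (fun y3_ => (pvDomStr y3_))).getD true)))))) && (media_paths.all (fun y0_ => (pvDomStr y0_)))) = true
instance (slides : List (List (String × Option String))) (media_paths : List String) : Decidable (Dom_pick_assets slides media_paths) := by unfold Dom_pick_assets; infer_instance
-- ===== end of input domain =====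

-- B replaces A's per-slide re-sort of media_paths by a round-robin over the distinct
-- paths in first-occurrence order (stable least-used-first IS cyclic assignment); the
-- equivalence proved is about the RETURN value (the Python A mutates the slide dicts
-- in place and returns the same list; B performs the same mutation).

-- s["asset"] = v on a slide dict (both Pythons execute exactly this statement)
def pvSetAsset (s : List (String × Option String)) (v : Option String) : List (String × Option String) :=
  ((PySem.Dict.mk s).insert "asset" v).items

-- ===== PORT A =====
def pick_assets (slides : List (List (String × Option String))) (media_paths : List String) : List (List (String × Option String)) :=
  -- use = {p: 0 for p in media_paths}
  let use0 : PySem.Dict String Int := media_paths.foldl (fun d p => d.insert p 0) (PySem.Dict.mk [])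
  let st := slides.foldl
    (fun (st : List (List (String × Option String)) × PySem.Dict String Int) s =>
      if media_paths.isEmpty then
        (st.1 ++ [pvSetAsset s none], st.2)
      else
        -- pick = sorted(media_paths, key=lambda p: use[p])[0]
        -- (use[p] is exact as getD: every p ∈ media_paths is a key of use;
        --  [0] via headD "": the guard makes the sorted list nonempty, so the
        --  default is unreachable and Python's IndexError cannot occur)
        let pick := (PySem.List.sorted media_paths (fun p => st.2.getD p 0)).headD ""
        (st.1 ++ [pvSetAsset s (some pick)], st.2.modify pick 0 (· + 1)))
    ([], use0)
  st.1

-- ===== PORT B =====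
def pick_assets_alt (slides : List (List (String × Option String))) (media_paths : List String) : List (List (String × Option String)) :=
  -- order = list(dict.fromkeys(media_paths))
  let order := PySem.List.dedup media_paths
  let n : Int := (order.length : Int)
  -- for i, s in enumerate(slides): s["asset"] = order[i % n] if n else None
  -- (order[i % n] via pyGetD: 0 ≤ i % n < n = len(order), in range, so the
  --  default is unreachable)
  (PySem.List.enumerate slides).map
    (fun is => pvSetAsset is.2 (if n == 0 then none else some (PySem.List.pyGetD order (PySem.Int.mod is.1 n) "")))

-- ===== PRECONDITION & SPEC =====
def Spec_pick_assets (slides : List (List (String × Option String))) (media_paths : List String) (out : List (List (String × Option String))) : Prop := out = pick_assets_alt slides media_paths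
instance (slides : List (List (String × Option String))) (media_paths : List String) (out : List (List (String × Option String))) : Decidable (Spec_pick_assets slides media_paths out) := by unfold Spec_pick_assets; infer_instance

-- ===== CLAIM (what is proved, stated in full; the proofs are below) =====
def Claim_equal_pick_assets : Prop := ∀ (slides : List (List (String × Option String))) (media_paths : List String), Dom_pick_assets slides media_paths → Spec_pick_assets slides media_paths (pick_assets slides media_paths)

-- ===== LEMMAS AND PROOFS =====

-- the first element of xs attaining the minimal key (ties keep the earlier one)
def pickMin {α : Type} (key : α → Int) : Option α → List α → Option α
  | h, [] => h
  | none, x :: t => pickMin key (some x) t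
  | some a, x :: t => pickMin key (some (if key x < key a then x else a)) t

theorem pickMin_append {α : Type} (key : α → Int) (u v : List α) (init : Option α) :
    pickMin key init (u ++ v) = pickMin key (pickMin key init u) v := by
  induction u generalizing init with
  | nil => rfl
  | cons x u ih => cases init <;> simp [pickMin, ih]

theorem pickMin_mem {α : Type} (key : α → Int) (u : List α) (init : Option α) (a : α)
    (h : pickMin key init u = some a) : init = some a ∨ a ∈ u := by
  induction u generalizing init with
  | nil => exact Or.inl h
  | cons x u ih =>
    cases init with
    | none =>
      simp only [pickMin] at h
      rcases ih (some x) h with h' | h'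
      · exact Or.inr (by simp at h'; simp [h'])
      · exact Or.inr (List.mem_cons_of_mem _ h')
    | some b =>
      simp only [pickMin] at h
      rcases ih _ h with h' | h'
      · by_cases hx : key x < key b
        · simp [hx] at h'; exact Or.inr (by simp [h'])
        · simp [hx] at h'; exact Or.inl (by simp [h'])
      · exact Or.inr (List.mem_cons_of_mem _ h')

theorem pickMin_stay {α : Type} (key : α → Int) (v : List α) (m : α)
    (h : ∀ y ∈ v, key m ≤ key y) : pickMin key (some m) v = some m := by
  induction v with
  | nil => rfl
  | cons y v ih =>
    have hy : ¬ key y < key m := not_lt.mpr (h y (by simp))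
    simp [pickMin, hy]
    exact ih (fun z hz => h z (List.mem_cons_of_mem _ hz))

theorem pickMin_first {α : Type} (key : α → Int) (u v : List α) (m : α)
    (hu : ∀ y ∈ u, key m < key y) (hv : ∀ y ∈ v, key m ≤ key y) :
    pickMin key none (u ++ m :: v) = some m := by
  rw [pickMin_append]
  rcases hm : pickMin key none u with _ | a
  · simpa [pickMin] using pickMin_stay key v m hv
  · rcases pickMin_mem key u none a hm with h | h
    · exact absurd h (by simp)
    · have := hu a h
      simp [pickMin, this]
      exact pickMin_stay key v m hv

theorem head?_insertBy {α : Type} (key : α → Int) (x : α) (acc : List α) :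
    (PySem.List.insertBy (fun a b => decide (key a < key b)) x acc).head? =
      some (match acc with | [] => x | a :: _ => if key x < key a then x else a) := by
  cases acc with
  | nil => rfl
  | cons a t =>
    by_cases h : key x < key a <;> simp [PySem.List.insertBy, h]

theorem head?_foldl_ins {α : Type} (key : α → Int) (t : List α) (acc : List α) :
    (t.foldl (fun acc x => PySem.List.insertBy (fun a b => decide (key a < key b)) x acc) acc).head? =
      pickMin key acc.head? t := by
  induction t generalizing acc with
  | nil => rfl
  | cons x t ih =>
    rw [List.foldl_cons, ih]
    cases acc with
    | nil => simp [head?_insertBy, pickMin]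
    | cons a r =>
      rw [head?_insertBy]
      by_cases h : key x < key a <;> simp [pickMin, h]

theorem sorted_head? {α : Type} (key : α → Int) (xs : List α) :
    (PySem.List.sorted xs key).head? = pickMin key none xs := by
  rw [PySem.List.sorted_eq_foldl_insertBy]
  exact head?_foldl_ins key xs []

-- split a list at the FIRST occurrence of a member
theorem first_occ_split {α : Type} [DecidableEq α] (xs : List α) (m : α) (h : m ∈ xs) :
    ∃ u v, xs = u ++ m :: v ∧ m ∉ u := by
  induction xs with
  | nil => cases h
  | cons x t ih =>
    by_cases hx : x = m
    · exact ⟨[], t, by simp [hx], by simp⟩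
    · have hmt : m ∈ t := by
        rcases List.mem_cons.mp h with h1 | h1
        · exact absurd h1.symm hx
        · exact h1
      rcases ih hmt with ⟨u, v, hsplit, hm⟩
      refine ⟨x :: u, v, by simp [hsplit], ?_⟩
      intro hc
      rcases List.mem_cons.mp hc with h1 | h1
      · exact hx h1.symm
      · exact hm h1

theorem foldl_setAdd_ext {α : Type} [BEq α] (v : List α) (s : List α) :
    ∃ g, v.foldl PySem.Set.add s = s ++ g := by
  induction v generalizing s with
  | nil => exact ⟨[], by simp⟩
  | cons x v ih =>
    rw [List.foldl_cons]
    by_cases hc : s.contains x = true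
    · have ha : PySem.Set.add s x = s := by simp [PySem.Set.add, hc]
      rw [ha]
      exact ih s
    · have ha : PySem.Set.add s x = s ++ [x] := by
        simp [PySem.Set.add, Bool.eq_false_iff.mpr hc]
      rw [ha]
      rcases ih (s ++ [x]) with ⟨g, hg⟩
      exact ⟨x :: g, by rw [hg]; simp⟩

-- dedup of a list split at the first occurrence of m starts with (dedup u) ++ [m]
theorem dedup_first_occ {α : Type} [BEq α] [LawfulBEq α] (u v : List α) (m : α) (hm : m ∉ u) :
    ∃ g, PySem.List.dedup (u ++ m :: v) = PySem.List.dedup u ++ m :: g := by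
  have h1 : PySem.List.dedup (u ++ m :: v) =
      v.foldl PySem.Set.add (PySem.Set.add (PySem.List.dedup u) m) := by
    simp [PySem.List.dedup_eq_ofList, PySem.Set.ofList_eq_foldl, List.foldl_append]
  rcases foldl_setAdd_ext v (PySem.Set.add (PySem.List.dedup u) m) with ⟨g, hg⟩
  refine ⟨g, ?_⟩
  rw [h1, hg]
  simp [PySem.Set.add, hm]

theorem unique_split {α : Type} (E F E' G : List α) (m : α)
    (hnd : (E ++ m :: F).Nodup) (heq : E ++ m :: F = E' ++ m :: G) : E = E' := by
  induction E generalizing E' with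
  | nil =>
    cases E' with
    | nil => rfl
    | cons x E' =>
      exfalso
      have hx : m = x ∧ F = E' ++ m :: G := by simpa using heq
      have hmF : m ∉ F := (List.nodup_cons.mp (by simpa using hnd)).1
      exact hmF (hx.2 ▸ (by simp : m ∈ E' ++ m :: G))
  | cons x E ih =>
    cases E' with
    | nil =>
      exfalso
      have hx : x = m ∧ E ++ m :: F = G := by simpa using heq
      have hxm : x ∉ E ++ m :: F := (List.nodup_cons.mp (by simpa using hnd)).1
      exact hxm (by simp [hx.1])
    | cons y E' =>
      have h2 : x = y ∧ E ++ m :: F = E' ++ m :: G := by simpa using heq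
      have hnd2 : (E ++ m :: F).Nodup := (List.nodup_cons.mp (by simpa using hnd)).2
      rw [ih E' hnd2 h2.2, h2.1]

theorem getD_foldl_insert_zero (l : List String) (d : PySem.Dict String Int) (p : String) :
    (l.foldl (fun d p => d.insert p 0) d).getD p 0 = if p ∈ l then 0 else d.getD p 0 := by
  induction l generalizing d with
  | nil => simp
  | cons x l ih =>
    rw [List.foldl_cons, ih]
    by_cases hx : p = x <;> by_cases hl : p ∈ l <;>
      simp [hx, hl, PySem.Dict.getD_insert]

-- the empty-media loop
theorem loop_empty (slides : List (List (String × Option String)))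
    (out : List (List (String × Option String))) (use : PySem.Dict String Int) (k : Int) :
    (slides.foldl
      (fun (st : List (List (String × Option String)) × PySem.Dict String Int) s =>
        (st.1 ++ [pvSetAsset s none], st.2)) (out, use)).1 =
      out ++ (PySem.List.enumerate slides k).map (fun is => pvSetAsset is.2 none) := by
  induction slides generalizing out use k with
  | nil => simp [PySem.List.enumerate]
  | cons s slides ih =>
    rw [List.foldl_cons, ih (out ++ [pvSetAsset s none]) use (k + 1)]
    simp [PySem.List.enumerate]

theorem headD_of_head? {α : Type} (l : List α) (a d : α) (h : l.head? = some a) :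
    l.headD d = a := by
  cases l with
  | nil => simp at h
  | cons x t => simp at h ⊢; exact h

-- the main loop invariant: with dedup media_paths = E ++ F, F ≠ [], use counting
-- q+1 on E and q on F, and k ≡ |E| (mod n), A's remaining loop produces B's tail
theorem loop_main (mp : List String) :
    ∀ (slides : List (List (String × Option String))) (k : Nat)
      (use : PySem.Dict String Int) (out : List (List (String × Option String)))
      (E F : List String) (q : Int),
    PySem.List.dedup mp = E ++ F → F ≠ [] →
    (∀ p ∈ E, use.getD p 0 = q + 1) → (∀ p ∈ F, use.getD p 0 = q) →
    k % (E.length + F.length) = E.length →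
    (slides.foldl
      (fun (st : List (List (String × Option String)) × PySem.Dict String Int) s =>
        if mp.isEmpty then
          (st.1 ++ [pvSetAsset s none], st.2)
        else
          let pick := (PySem.List.sorted mp (fun p => st.2.getD p 0)).headD ""
          (st.1 ++ [pvSetAsset s (some pick)], st.2.modify pick 0 (· + 1)))
      (out, use)).1 =
      out ++ (PySem.List.enumerate slides (k : Int)).map
        (fun is => pvSetAsset is.2
          (some (PySem.List.pyGetD (PySem.List.dedup mp)
            (PySem.Int.mod is.1 ((PySem.List.dedup mp).length : Int)) ""))) := by
  intro slides
  induction slides with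
  | nil =>
    intro k use out E F q _ _ _ _ _
    simp [PySem.List.enumerate]
  | cons s slides ih =>
    intro k use out E F q hsplit hF hkE hkF hk
    rcases F with _ | ⟨f, F'⟩
    · exact absurd rfl hF
    have hndD : (PySem.List.dedup mp).Nodup := PySem.List.nodup_dedup mp
    have hnd2 : (E ++ f :: F').Nodup := hsplit ▸ hndD
    have hfE : f ∉ E := by
      have hd := List.disjoint_of_nodup_append hnd2
      exact fun hc => hd hc (by simp)
    have hfF' : f ∉ F' :=
      (List.nodup_cons.mp (List.Nodup.of_append_right hnd2)).1
    have hmp_ne : mp ≠ [] := by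
      intro h
      rw [h] at hsplit
      exact absurd hsplit.symm (by simp [PySem.List.dedup, PySem.Set.ofList])
    have hempty : mp.isEmpty = false := by
      cases mp with
      | nil => exact absurd rfl hmp_ne
      | cons a t => rfl
    -- pick = f
    have hfD : f ∈ PySem.List.dedup mp := by rw [hsplit]; simp
    have hfmp : f ∈ mp := (PySem.List.mem_dedup mp f).mp hfD
    rcases first_occ_split mp f hfmp with ⟨u, v, hmpsplit, hfu⟩
    rcases dedup_first_occ u v f hfu with ⟨g, hdd⟩
    have hEdu : E = PySem.List.dedup u := by
      refine unique_split E F' (PySem.List.dedup u) g f hnd2 ?_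
      rw [← hsplit, hmpsplit]
      exact hdd
    have hpick : pickMin (fun p => use.getD p 0) none mp = some f := by
      rw [hmpsplit]
      apply pickMin_first
      · intro y hy
        have hyE : y ∈ E := by
          rw [hEdu]
          exact (PySem.List.mem_dedup u y).mpr hy
        rw [hkE y hyE, hkF f (by simp)]
        omega
      · intro y hy
        have hymp : y ∈ mp := by rw [hmpsplit]; simp [hy]
        have hyD : y ∈ E ++ f :: F' := by
          rw [← hsplit]
          exact (PySem.List.mem_dedup mp y).mpr hymp
        rw [hkF f (by simp)]
        rcases List.mem_append.mp hyD with h | h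
        · rw [hkE y h]; omega
        · rw [hkF y h]
    have hsort : (PySem.List.sorted mp (fun p => use.getD p 0)).headD "" = f :=
      headD_of_head? _ _ _ (by rw [sorted_head?]; exact hpick)
    -- the B-side element at index k is f
    have hlen : (PySem.List.dedup mp).length = E.length + (F'.length + 1) := by
      rw [hsplit]; simp
    have hbelem : PySem.List.pyGetD (PySem.List.dedup mp)
        (PySem.Int.mod (k : Int) ((PySem.List.dedup mp).length : Int)) "" = f := by
      rw [PySem.Int.mod_natCast, PySem.List.pyGetD_natCast]
      rw [hlen]
      have hk' : k % (E.length + (F'.length + 1)) = E.length := by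
        simpa using hk
      rw [hk', hsplit]
      rw [List.getD_eq_getElem?_getD, List.getElem?_append_right (le_refl E.length)]
      simp
    -- one loop step
    have hstep : (if mp.isEmpty = true then ((out, use).1 ++ [pvSetAsset s none], (out, use).2)
        else
          let pick := (PySem.List.sorted mp fun p => (out, use).2.getD p 0).headD "";
          ((out, use).1 ++ [pvSetAsset s (some pick)], (out, use).2.modify pick 0 fun x => x + 1))
        = (out ++ [pvSetAsset s (some f)], use.modify f 0 fun x => x + 1) := by
      simp only [hempty, Bool.false_eq_true, if_false, hsort]
    rw [List.foldl_cons, hstep]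
    -- new use counts
    have hkE' : ∀ p ∈ E ++ [f], (use.modify f 0 (· + 1)).getD p 0 = q + 1 := by
      intro p hp
      rcases List.mem_append.mp hp with h | h
      · rw [PySem.Dict.getD_modify]
        have : ¬ p = f := fun hc => hfE (hc ▸ h)
        rw [if_neg this, hkE p h]
      · simp at h
        rw [PySem.Dict.getD_modify, if_pos h, hkF f (by simp)]
    have hkF'0 : ∀ p ∈ F', (use.modify f 0 (· + 1)).getD p 0 = q := by
      intro p hp
      rw [PySem.Dict.getD_modify]
      have : ¬ p = f := fun hc => hfF' (hc ▸ hp)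
      rw [if_neg this, hkF p (by simp [hp])]
    rcases F' with _ | ⟨f2, F''⟩
    · -- wrap around: E' = [], F' = E ++ [f], q' = q + 1
      have := ih (k + 1) (use.modify f 0 (· + 1)) (out ++ [pvSetAsset s (some f)])
        [] (E ++ [f]) (q + 1)
        (by rw [hsplit]; simp) (by simp)
        (by intro p hp; simp at hp)
        (by simpa using hkE')
        (by
          have hkk : k % (E.length + 1) = E.length := by simpa using hk
          have h1 : (k + 1) % (E.length + 1) = (E.length + 1 % (E.length + 1)) % (E.length + 1) := by
            rw [Nat.add_mod, hkk]
          have h4 : (k + 1) % (E.length + 1) = 0 := by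
            rcases Nat.eq_zero_or_pos E.length with h0 | h0
            · simp [h0, Nat.mod_one]
            · have h2 : 1 % (E.length + 1) = 1 := Nat.mod_eq_of_lt (by omega)
              rw [h2] at h1
              rw [h1, Nat.mod_self]
          simpa using h4)
      push_cast at this
      have he : PySem.List.enumerate (s :: slides) (k : Int) =
          ((k : Int), s) :: PySem.List.enumerate slides ((k : Int) + 1) := by
        simp [PySem.List.enumerate]
      rw [he, this, List.map_cons]
      simp only [hbelem]
      simp
    · -- advance: E' = E ++ [f], F' = f2 :: F'', same q
      have := ih (k + 1) (use.modify f 0 (· + 1)) (out ++ [pvSetAsset s (some f)])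
        (E ++ [f]) (f2 :: F'') q
        (by rw [hsplit]; simp) (by simp)
        hkE' hkF'0
        (by
          have hkk : k % (E.length + (F''.length + 1 + 1)) = E.length := by simpa using hk
          have h2 : (k + 1) % (E.length + (F''.length + 1 + 1)) =
              (E.length + 1) % (E.length + (F''.length + 1 + 1)) := by
            rw [Nat.add_mod, hkk, Nat.mod_eq_of_lt (show (1:Nat) < E.length + (F''.length + 1 + 1) by omega)]
          have h3 : (E.length + 1) % (E.length + (F''.length + 1 + 1)) = E.length + 1 :=
            Nat.mod_eq_of_lt (by omega)
          have h4 := h2.trans h3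
          have hm : (E ++ [f]).length + (f2 :: F'').length = E.length + (F''.length + 1 + 1) := by
            simp
            omega
          rw [hm, h4]
          simp)
      push_cast at this
      have he : PySem.List.enumerate (s :: slides) (k : Int) =
          ((k : Int), s) :: PySem.List.enumerate slides ((k : Int) + 1) := by
        simp [PySem.List.enumerate]
      rw [he, this, List.map_cons]
      simp only [hbelem]
      simp

-- ===== VERDICT (by name: the statement is the Claim_ definition above) =====
theorem dedup_ne_nil (mp : List String) (h : mp ≠ []) : PySem.List.dedup mp ≠ [] := by
  cases mp with
  | nil => exact absurd rfl h
  | cons x t =>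
    intro hc
    have : x ∈ PySem.List.dedup (x :: t) := (PySem.List.mem_dedup _ _).mpr (by simp)
    rw [hc] at this
    simp at this

theorem pick_assets_spec : Claim_equal_pick_assets := by
  intro slides mp _
  unfold Spec_pick_assets pick_assets pick_assets_alt
  by_cases hmp : mp = []
  · subst hmp
    simp only [List.isEmpty_nil, if_true]
    rw [loop_empty slides [] _ 0]
    simp [PySem.List.dedup, PySem.Set.ofList]
  · have hne : PySem.List.dedup mp ≠ [] := dedup_ne_nil mp hmp
    have hlen0 : (PySem.List.dedup mp).length ≠ 0 := by
      simpa [List.length_eq_zero_iff] using hne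
    have hif : (((PySem.List.dedup mp).length : Int) == 0) = false := by
      simpa using hlen0
    have h0 := loop_main mp slides 0
      (mp.foldl (fun d p => d.insert p 0) (PySem.Dict.mk []))
      [] [] (PySem.List.dedup mp) 0 rfl hne
      (by intro p hp; simp at hp)
      (by
        intro p hp
        have hpm : p ∈ mp := (PySem.List.mem_dedup mp p).mp hp
        rw [getD_foldl_insert_zero, if_pos hpm])
      (by simp)
    simp only [Nat.cast_zero] at h0
    rw [h0]
    simp only [hif, Bool.false_eq_true, if_false]
    simp
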